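-- pv_equiv track=rewrite | github.com/tsackton/taelgar | _scripts/build_session_note_components.py | extract_required_subsection
-- ===== SOURCE A (Python) =====
-- from typing import Any, Dict, Iterable, List, Optional, Sequence, Tuple
--
-- def extract_required_subsection(lines: Sequence[str], heading: str, label: str, errors: List[str]) -> List[str]:
--     start_index: Optional[int] = None
--     for index, line in enumerate(lines):
--         if line.strip() == heading:
--             start_index = index + 1
--             break
--     if start_index is None:
--         errors.append(f"{label} section is missing subsection {heading}.")
--         return []
--     end_index = len(lines)
--     for index in range(start_index, len(lines)):
--         if lines[index].startswith("### "):
--             end_index = index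
--             break
--     return list(lines[start_index:end_index])
-- ===== SOURCE B (Python) =====
-- def extract_required_subsection(lines, heading, label, errors):
--     it = iter(lines)
--     for line in it:
--         if line.strip() == heading:
--             out = []
--             for rest in it:
--                 if rest.startswith("### "):
--                     break
--                 out.append(rest)
--             return out
--     errors.append(f"{label} section is missing subsection {heading}.")
--     return []
-- ===== Notes on version B (the rewrite author's own statement) =====
-- stated objective: simpler
-- what changed: Replaces the index-based two-loop version (enumerate to find the heading index, then range(start,len) with lines[index] and a slice) by a shared-iterator scan: find the heading, then collect from the same iterator until a '### ' line, with no indices or slicing at all.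
import Mathlib
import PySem

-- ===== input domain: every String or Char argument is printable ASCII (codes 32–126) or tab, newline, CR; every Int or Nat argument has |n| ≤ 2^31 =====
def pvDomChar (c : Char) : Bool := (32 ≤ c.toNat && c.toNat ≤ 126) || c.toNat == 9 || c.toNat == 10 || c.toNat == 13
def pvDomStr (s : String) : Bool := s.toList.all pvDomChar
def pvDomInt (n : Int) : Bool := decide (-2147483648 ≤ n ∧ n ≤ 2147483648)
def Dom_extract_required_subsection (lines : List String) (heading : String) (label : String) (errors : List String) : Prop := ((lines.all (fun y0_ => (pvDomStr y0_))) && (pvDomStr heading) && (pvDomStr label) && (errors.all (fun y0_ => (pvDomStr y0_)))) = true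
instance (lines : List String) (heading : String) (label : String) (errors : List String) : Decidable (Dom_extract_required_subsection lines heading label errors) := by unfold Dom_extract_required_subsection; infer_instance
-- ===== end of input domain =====

-- B replaces A's index arithmetic (enumerate, range(start,len), lines[index], a slice) by a
-- shared-iterator scan with no indices: simpler decomposition, same cost. A also appends an error
-- message to `errors` when the heading is missing (B performs the same mutation); the equivalence
-- proved here is about the RETURN value only.

-- ===== PORT A =====
-- first loop: 'for index, line in enumerate(lines): if line.strip() == heading: start_index = index + 1; break'
def pvA_findStart (heading : String) : List String → Int → Option Int
  | [], _ => none
  | l :: rest, i =>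
      if PySem.Str.strip l == heading then some (i + 1) else pvA_findStart heading rest (i + 1)

-- second loop: 'for index in range(start_index, len(lines)): if lines[index].startswith("### "): end_index = index; break'
def pvA_findEnd (lines : List String) (dflt : Int) : List Int → Int
  | [] => dflt
  | i :: rest =>
      if PySem.Str.startswith (PySem.List.pyGetD lines i "") "### " then i
      else pvA_findEnd lines dflt rest

def extract_required_subsection (lines : List String) (heading : String) (label : String) (errors : List String) : List String :=
  match pvA_findStart heading lines 0 with
  | none => []    -- errors.append(f"{label} section is missing subsection {heading}.") mutates the argument; return value is []
  | some s =>
      let e := pvA_findEnd lines (lines.length : Int) (PySem.List.pyRange s (lines.length : Int) 1)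
      PySem.List.slice lines (some s) (some e)

-- ===== PORT B =====
-- inner loop: 'for rest in it: if rest.startswith("### "): break; out.append(rest)'
def pvB_take : List String → List String
  | [] => []
  | l :: rest => if PySem.Str.startswith l "### " then [] else l :: pvB_take rest

-- outer loop over the shared iterator: on a heading match, collect from the remainder
def pvB_find (heading : String) : List String → Option (List String)
  | [] => none
  | l :: rest =>
      if PySem.Str.strip l == heading then some (pvB_take rest) else pvB_find heading rest

def extract_required_subsection_alt (lines : List String) (heading : String) (label : String) (errors : List String) : List String :=
  match pvB_find heading lines with
  | none => []    -- errors.append(...) mutation, return []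
  | some out => out

-- ===== PRECONDITION & SPEC =====
def Spec_extract_required_subsection (lines : List String) (heading : String) (label : String) (errors : List String) (out : List String) : Prop := out = extract_required_subsection_alt lines heading label errors
instance (lines : List String) (heading : String) (label : String) (errors : List String) (out : List String) : Decidable (Spec_extract_required_subsection lines heading label errors out) := by unfold Spec_extract_required_subsection; infer_instance

-- ===== CLAIM (what is proved, stated in full; the proofs are below) =====
def Claim_equal_extract_required_subsection : Prop := ∀ (lines : List String) (heading : String) (label : String) (errors : List String), Dom_extract_required_subsection lines heading label errors → Spec_extract_required_subsection lines heading label errors (extract_required_subsection lines heading label errors)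

-- ===== LEMMAS AND PROOFS =====

theorem pv_findIdx?_lt_length {α : Type} (p : α → Bool) (l : List α) (k : Nat)
    (h : l.findIdx? p = some k) : k < l.length := by
  induction l generalizing k with
  | nil => simp at h
  | cons a rest ih =>
      rw [List.findIdx?_cons] at h
      cases hp : p a with
      | true => simp [hp] at h; simp [List.length_cons]; omega
      | false =>
          simp [hp] at h
          obtain ⟨m, hm, rfl⟩ := h
          have := ih m hm
          simp; omega

theorem pvA_findStart_eq (heading : String) (tail : List String) (j : Nat) :
    pvA_findStart heading tail (j : Int)
      = (tail.findIdx? (fun l => PySem.Str.strip l == heading)).map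
          (fun k => ((j + k + 1 : Nat) : Int)) := by
  induction tail generalizing j with
  | nil => simp [pvA_findStart]
  | cons l rest ih =>
      rw [pvA_findStart, List.findIdx?_cons]
      cases hp : (PySem.Str.strip l == heading) with
      | true =>
          rw [if_pos rfl, if_pos rfl, Option.map_some]
          exact congrArg some (by push_cast; ring)
      | false =>
          rw [if_neg (by simp), if_neg (by simp)]
          have hcast : ((j : Nat) : Int) + 1 = ((j + 1 : Nat) : Int) := by push_cast; ring
          rw [hcast, ih (j + 1)]
          cases rest.findIdx? (fun l => PySem.Str.strip l == heading) with
          | none => rfl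
          | some k =>
              simp only [Option.map_some]
              congr 1
              have : j + 1 + k + 1 = j + (k + 1) + 1 := by omega
              rw [this]

theorem pvB_find_eq (heading : String) (tail : List String) :
    pvB_find heading tail
      = (tail.findIdx? (fun l => PySem.Str.strip l == heading)).map
          (fun k => pvB_take (tail.drop (k + 1))) := by
  induction tail with
  | nil => simp [pvB_find]
  | cons l rest ih =>
      rw [pvB_find, List.findIdx?_cons]
      cases hp : (PySem.Str.strip l == heading) with
      | true => rw [if_pos rfl, if_pos rfl, Option.map_some, List.drop_succ_cons, List.drop_zero]
      | false =>
          rw [if_neg (by simp), if_neg (by simp), ih]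
          cases rest.findIdx? (fun l => PySem.Str.strip l == heading) with
          | none => rfl
          | some k => simp only [Option.map_some, List.drop_succ_cons]

theorem pvB_take_eq (xs : List String) :
    pvB_take xs = xs.take (xs.findIdx (fun l => PySem.Str.startswith l "### ")) := by
  induction xs with
  | nil => simp [pvB_take]
  | cons l rest ih =>
      rw [pvB_take, List.findIdx_cons]
      cases hp : (PySem.Str.startswith l "### ") with
      | true => rw [if_pos rfl, cond_true, List.take_zero]
      | false => rw [if_neg (by simp), cond_false, List.take_succ_cons, ih]

theorem pvA_findEnd_eq (lines : List String) (s : Nat) (hs : s ≤ lines.length) :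
    pvA_findEnd lines (lines.length : Int) (PySem.List.pyRange (s : Int) (lines.length : Int) 1)
      = ((s + (lines.drop s).findIdx (fun l => PySem.Str.startswith l "### ") : Nat) : Int) := by
  rcases Nat.lt_or_ge s lines.length with hlt | hge
  · rw [PySem.List.pyRange_one_cons (by exact_mod_cast hlt), pvA_findEnd]
    have hget : PySem.List.pyGetD lines (s : Int) "" = lines[s] := by
      rw [PySem.List.pyGetD_natCast, List.getD_eq_getElem lines "" hlt]
    have hdrop : lines.drop s = lines[s] :: lines.drop (s + 1) :=
      List.drop_eq_getElem_cons hlt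
    rw [hget, hdrop, List.findIdx_cons]
    cases hp : (PySem.Str.startswith lines[s] "### ") with
    | true => rw [if_pos rfl, cond_true]; norm_num
    | false =>
        rw [if_neg (by simp), cond_false]
        have hcast : ((s : Nat) : Int) + 1 = ((s + 1 : Nat) : Int) := by push_cast; ring
        rw [hcast, pvA_findEnd_eq lines (s + 1) hlt]
        congr 1
        omega
  · have hse : s = lines.length := le_antisymm hs hge
    subst hse
    rw [PySem.List.pyRange_one_eq_nil (le_refl _), pvA_findEnd]
    simp
termination_by lines.length - s
decreasing_by omega

-- ===== VERDICT (by name: the statement is the Claim_ definition above) =====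
theorem extract_required_subsection_spec : Claim_equal_extract_required_subsection := by
  intro lines heading label errors _
  unfold Spec_extract_required_subsection extract_required_subsection extract_required_subsection_alt
  have hA := pvA_findStart_eq heading lines 0
  rw [show ((0 : Nat) : Int) = (0 : Int) from rfl] at hA
  rw [hA, pvB_find_eq]
  cases hfi : lines.findIdx? (fun l => PySem.Str.strip l == heading) with
  | none => rfl
  | some k =>
      have hk : k < lines.length := pv_findIdx?_lt_length _ lines k hfi
      simp only [Option.map_some]
      have hs1 : ((0 + k + 1 : Nat) : Int) = ((k + 1 : Nat) : Int) := by push_cast; ring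
      rw [hs1, pvA_findEnd_eq lines (k + 1) hk]
      have hsplit : ((k + 1 + (lines.drop (k + 1)).findIdx (fun l => PySem.Str.startswith l "### ") : Nat) : Int)
          = ((k + 1 : Nat) : Int) + (((lines.drop (k + 1)).findIdx (fun l => PySem.Str.startswith l "### ") : Nat) : Int) := by
        push_cast; ring
      rw [hsplit, PySem.List.slice_natCast_add, pvB_take_eq]
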